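-- pv_equiv track=rewrite | github.com/rafalmierzwiak/yearn | code/reverse_text_not_tags.py | reverse_text_not_tags
-- ===== SOURCE A (Python) =====
-- def reverse(text):
--     def _(text):
--         for i in range(len(text)-1, -1, -1):
--             yield text[i]
--     return ''.join(_(text))
--
-- def reverse_text_not_tags(text, tag_open='<', tag_close='>'):
--     def _(text):
--         i = 0
--         while i < len(text):
--             tag_start = text.find(tag_open, i)
--             if tag_start == -1:
--                 yield reverse(text[i:])
--                 break
--             elif tag_start == i:
--                 tag_end = text.find(tag_close, tag_start)
--                 if tag_end == -1:
--                     yield text[i:tag_start]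
--                     break
--                 else:
--                     tag_end += 1
--                     yield text[i:tag_end]
--                     i = tag_end
--             else:
--                 yield reverse(text[i:tag_start])
--                 i = tag_start
--     return ''.join(_(text))
-- ===== SOURCE B (Python) =====
-- def reverse_text_not_tags(text, tag_open='<', tag_close='>'):
--     # single pass: accumulate plain text in buf, flush buf reversed at a tag
--     # start; scan char-by-char for the tag close (drop the rest if none).
--     out = []
--     buf = []
--     i = 0
--     n = len(text)
--     while i < n:
--         if text.startswith(tag_open, i):
--             out.append(''.join(reversed(buf)))
--             buf = []
--             j = i
--             while j <= n and not text.startswith(tag_close, j):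
--                 j += 1
--             if j > n:
--                 return ''.join(out)
--             out.append(text[i:j + 1])
--             i = j + 1
--         else:
--             buf.append(text[i])
--             i += 1
--     out.append(''.join(reversed(buf)))
--     return ''.join(out)
-- ===== Notes on version B (the rewrite author's own statement) =====
-- stated objective: alternative
-- what changed: Replaces A's find-driven slice-and-jump generator loop with a single character-by-character pass that accumulates plain text in a buffer, flushes it reversed at each tag start, and scans for the tag close one position at a time (dropping the rest on an unterminated tag).
import Mathlib
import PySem

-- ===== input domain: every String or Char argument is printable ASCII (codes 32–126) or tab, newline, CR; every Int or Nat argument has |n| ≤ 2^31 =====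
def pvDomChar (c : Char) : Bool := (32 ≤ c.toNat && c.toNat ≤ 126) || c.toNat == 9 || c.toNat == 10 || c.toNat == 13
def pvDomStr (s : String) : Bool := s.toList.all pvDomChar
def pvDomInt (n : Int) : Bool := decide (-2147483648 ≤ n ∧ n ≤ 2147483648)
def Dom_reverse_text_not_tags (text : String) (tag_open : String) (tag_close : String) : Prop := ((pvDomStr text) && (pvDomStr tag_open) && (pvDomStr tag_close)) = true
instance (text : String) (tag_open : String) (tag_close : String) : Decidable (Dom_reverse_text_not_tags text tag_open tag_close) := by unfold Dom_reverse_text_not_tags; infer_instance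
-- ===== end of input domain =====

-- B is a single forward pass with a character buffer (flushed reversed at each tag
-- start, tag scanned char-by-char) instead of A's find-driven slice-and-jump loop;
-- objective: alternative decomposition, same asymptotic cost.

-- ===== PORT A =====

-- port of the module helper 'reverse': ''.join(text[i] for i in range(len(text)-1,-1,-1))
def pyReverse (s : List Char) : List Char :=
  (PySem.List.pyRange (PySem.Chars.len s - 1) (-1) (-1)).map (fun j => PySem.List.pyGetD s j ' ')

-- the generator loop of A: state is the index i; each yielded piece is one list element
def aLoop (t op cl : List Char) (i : Nat) : List (List Char) :=
  if hlt : i < t.length then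
    if hts : PySem.Chars.findFrom t op (i : Int) = -1 then
      [pyReverse (PySem.Chars.slice t (some (i : Int)) none)]
    else if hei : PySem.Chars.findFrom t op (i : Int) = (i : Int) then
      if hte : PySem.Chars.findFrom t cl (PySem.Chars.findFrom t op (i : Int)) = -1 then
        [PySem.Chars.slice t (some (i : Int)) (some (PySem.Chars.findFrom t op (i : Int)))]
      else
        PySem.Chars.slice t (some (i : Int)) (some (PySem.Chars.findFrom t cl (PySem.Chars.findFrom t op (i : Int)) + 1)) ::
          aLoop t op cl (PySem.Chars.findFrom t cl (PySem.Chars.findFrom t op (i : Int)) + 1).toNat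
    else
      pyReverse (PySem.Chars.slice t (some (i : Int)) (some (PySem.Chars.findFrom t op (i : Int)))) ::
        aLoop t op cl (PySem.Chars.findFrom t op (i : Int)).toNat
  else []
termination_by t.length - i
decreasing_by
  · rw [hei] at hte
    have h1 := (PySem.Chars.findFrom_natCast_spec t cl i (by omega) hte).1
    rw [hei]
    omega
  · have h1 := (PySem.Chars.findFrom_natCast_spec t op i (by omega) hts).1
    omega

def reverse_text_not_tags (text : String) (tag_open : String) (tag_close : String) : String :=
  String.ofList (PySem.Chars.join [] (aLoop text.toList tag_open.toList tag_close.toList 0))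

-- ===== PORT B =====

-- inner while of Source B: offset (from i) of the first position where tag_close starts, none if it never does
def bScanOff (cl : List Char) (s : List Char) : Option Nat :=
  match s with
  | [] => if PySem.Chars.startswith [] cl then some 0 else none
  | c :: rest =>
      if PySem.Chars.startswith (c :: rest) cl then some 0
      else (bScanOff cl rest).map (· + 1)

-- outer while of Source B: out = emitted pieces, buf = pending plain text, i = position
def bGo (t op cl : List Char) (out : List (List Char)) (buf : List Char) (i : Nat) : List Char :=
  if hlt : i < t.length then
    if PySem.Chars.startswith (t.drop i) op then
      match bScanOff cl (t.drop i) with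
      | none => PySem.Chars.join [] (out ++ [buf.reverse])
      | some k =>
          bGo t op cl ((out ++ [buf.reverse]) ++ [PySem.Chars.slice t (some (i : Int)) (some ((i : Int) + (k : Int) + 1))])
            [] (i + k + 1)
    else bGo t op cl out (buf ++ [t.getD i ' ']) (i + 1)
  else PySem.Chars.join [] (out ++ [buf.reverse])
termination_by t.length - i
decreasing_by all_goals omega

def reverse_text_not_tags_alt (text : String) (tag_open : String) (tag_close : String) : String :=
  String.ofList (bGo text.toList tag_open.toList tag_close.toList [] [] 0)

-- ===== PRECONDITION & SPEC =====
def Spec_reverse_text_not_tags (text : String) (tag_open : String) (tag_close : String) (out : String) : Prop := out = reverse_text_not_tags_alt text tag_open tag_close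
instance (text : String) (tag_open : String) (tag_close : String) (out : String) : Decidable (Spec_reverse_text_not_tags text tag_open tag_close out) := by unfold Spec_reverse_text_not_tags; infer_instance

-- ===== CLAIM (what is proved, stated in full; the proofs are below) =====
def Claim_equal_reverse_text_not_tags : Prop := ∀ (text : String) (tag_open : String) (tag_close : String), Dom_reverse_text_not_tags text tag_open tag_close → Spec_reverse_text_not_tags text tag_open tag_close (reverse_text_not_tags text tag_open tag_close)

-- ===== LEMMAS AND PROOFS =====

lemma join_nil_eq_flatten (ps : List (List Char)) : PySem.Chars.join [] ps = ps.flatten := by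
  induction ps with
  | nil => simp [PySem.Chars.join_nil]
  | cons p rest ih =>
    cases rest with
    | nil => simp [PySem.Chars.join_singleton]
    | cons q r => rw [PySem.Chars.join_cons_cons]; simp_all

lemma pyReverse_eq (s : List Char) : pyReverse s = s.reverse := by
  unfold pyReverse
  rw [PySem.Chars.len_eq, PySem.List.pyRange_neg_one]
  rw [List.map_map]
  apply List.ext_getElem
  · simp
  · intro j h1 h2
    simp only [List.getElem_map, List.getElem_range, Function.comp_apply, List.getElem_reverse]
    have h1' : j < s.length := by simpa using h2
    have harg : (s.length : Int) - 1 - (j : Int) = ((s.length - 1 - j : Nat) : Int) := by omega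
    rw [harg, PySem.List.pyGetD_natCast]
    rw [List.getD_eq_getElem?_getD, List.getElem?_eq_getElem (by omega)]
    simp

lemma prefix_suffix_infix {a b c : List Char} (h1 : a <+: b) (h2 : b <:+ c) : a <:+: c := by
  obtain ⟨r, rfl⟩ := h1
  obtain ⟨l, rfl⟩ := h2
  exact ⟨l, r, by simp⟩

lemma findFrom_none (t sub : List Char) (p : Nat) (hp : p ≤ t.length)
    (hno : ∀ q, p ≤ q → ¬ sub <+: t.drop q) :
    PySem.Chars.findFrom t sub (p : Int) = -1 := by
  rw [PySem.Chars.findFrom_natCast_eq_neg_one_iff t sub p hp]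
  intro hinf
  have hin : PySem.Chars.isIn sub (t.drop p) = true := (PySem.Chars.isIn_iff_infix _ _).mpr hinf
  obtain ⟨j, hj⟩ := (PySem.Chars.exists_prefix_drop_iff_isIn sub (t.drop p)).mpr hin
  rw [List.drop_drop] at hj
  exact hno (p + j) (by omega) hj

lemma findFrom_first (t sub : List Char) (p j : Nat) (hp : p ≤ j) (hj : j ≤ t.length)
    (hm : sub <+: t.drop j) (hno : ∀ q, p ≤ q → q < j → ¬ sub <+: t.drop q) :
    PySem.Chars.findFrom t sub (p : Int) = (j : Int) := by
  have hple : p ≤ t.length := le_trans hp hj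
  rw [PySem.Chars.findFrom_natCast t sub p hple]
  have hinf : sub <:+: t.drop p := by
    have h1 : sub <+: (t.drop p).drop (j - p) := by
      rw [List.drop_drop]
      have heq : p + (j - p) = j := by omega
      rwa [heq]
    exact prefix_suffix_infix h1 (List.drop_suffix _ _)
  have hpos : 0 ≤ PySem.Chars.find (t.drop p) sub := (PySem.Chars.find_nonneg_iff _ _).mpr hinf
  obtain ⟨hf1, hf2⟩ := PySem.Chars.find_spec hpos
  set f := (PySem.Chars.find (t.drop p) sub).toNat with hf
  have hne : ¬ PySem.Chars.find (t.drop p) sub = -1 := by omega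
  rw [if_neg hne]
  have hfeq : f = j - p := by
    by_contra hne2
    rcases Nat.lt_or_ge f (j - p) with hlt | hge
    · rw [List.drop_drop] at hf1
      exact hno (p + f) (by omega) (by omega) hf1
    · have hlt : j - p < f := by omega
      have hcon := hf2 (j - p) hlt
      rw [List.drop_drop] at hcon
      have heq : p + (j - p) = j := by omega
      rw [heq] at hcon
      exact hcon hm
  omega

-- terminal case: the outer while has ended (i = len): B flushes buf reversed
lemma bGo_terminal (t op cl : List Char) (p : Nat) (out : List (List Char)) (buf : List Char)
    (hp : p ≤ t.length) (hbuf : buf = (t.drop p).take (t.length - p))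
    (hno : ∀ q, p ≤ q → q < t.length → ¬ op <+: t.drop q) :
    bGo t op cl out buf t.length = PySem.Chars.join [] out ++ PySem.Chars.join [] (aLoop t op cl p) := by
  rw [bGo, dif_neg (lt_irrefl t.length)]
  rw [join_nil_eq_flatten, join_nil_eq_flatten, join_nil_eq_flatten]
  by_cases hpe : p = t.length
  · subst hpe
    rw [aLoop, dif_neg (lt_irrefl _)]
    simp at hbuf
    simp [hbuf]
  · have hplt : p < t.length := by omega
    have hop_ne : ¬ op <+: t.drop p := hno p le_rfl hplt
    have hno' : ∀ q, p ≤ q → ¬ op <+: t.drop q := by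
      intro q hq hpre
      by_cases hql : q < t.length
      · exact hno q hq hql hpre
      · have : t.drop q = [] := List.drop_eq_nil_of_le (by omega)
        rw [this] at hpre
        have : op = [] := List.prefix_nil.mp hpre
        exact hop_ne (this ▸ List.nil_prefix)
    have hts := findFrom_none t op p (le_of_lt hplt) hno'
    rw [aLoop, dif_pos hplt, dif_pos hts]
    rw [PySem.Chars.slice_eq_listSlice, PySem.List.slice_from_natCast, pyReverse_eq]
    have hbuf' : buf = t.drop p := by
      rw [hbuf]
      exact List.take_of_length_le (by simp)
    simp [hbuf']

lemma scan_none (cl : List Char) : ∀ (s : List Char), bScanOff cl s = none →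
    ∀ m, ¬ cl <+: s.drop m := by
  intro s
  induction s with
  | nil =>
    intro h m
    simp only [bScanOff] at h
    split at h
    · exact absurd h (by simp)
    · rename_i hsw
      rw [Bool.not_eq_true, ← Bool.not_eq_true, PySem.Chars.startswith_iff] at hsw
      simpa using hsw
  | cons c rest ih =>
    intro h m
    simp only [bScanOff] at h
    split at h
    · exact absurd h (by simp)
    · rename_i hsw
      rw [Bool.not_eq_true, ← Bool.not_eq_true, PySem.Chars.startswith_iff] at hsw
      cases m with
      | zero => simpa using hsw
      | succ m2 =>
        have := ih (by simpa using h) m2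
        simpa using this

lemma scan_some (cl : List Char) : ∀ (s : List Char) (k : Nat), bScanOff cl s = some k →
    cl <+: s.drop k ∧ ∀ m, m < k → ¬ cl <+: s.drop m := by
  intro s
  induction s with
  | nil =>
    intro k h
    simp only [bScanOff] at h
    split at h
    · rename_i hsw
      rw [PySem.Chars.startswith_iff] at hsw
      obtain rfl : k = 0 := by simpa using h.symm
      exact ⟨by simpa using hsw, by omega⟩
    · simp at h
  | cons c rest ih =>
    intro k h
    simp only [bScanOff] at h
    split at h
    · rename_i hsw
      rw [PySem.Chars.startswith_iff] at hsw
      obtain rfl : k = 0 := by simpa using h.symm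
      exact ⟨by simpa using hsw, by omega⟩
    · rename_i hsw
      rw [Bool.not_eq_true, ← Bool.not_eq_true, PySem.Chars.startswith_iff] at hsw
      rcases Option.map_eq_some_iff.mp h with ⟨k2, hk2, rfl⟩
      obtain ⟨h1, h2⟩ := ih k2 hk2
      refine ⟨by simpa using h1, ?_⟩
      intro m hm
      cases m with
      | zero => simpa using hsw
      | succ m2 => simpa using h2 m2 (by omega)

-- A at the start of a plain-text run followed by a tag start at i: the first piece is the run reversed
lemma aLoop_text_skip (t op cl : List Char) (p i : Nat) (hpi : p < i) (hi : i ≤ t.length)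
    (hm : op <+: t.drop i) (hno : ∀ q, p ≤ q → q < i → ¬ op <+: t.drop q) :
    aLoop t op cl p = ((t.drop p).take (i - p)).reverse :: aLoop t op cl i := by
  have hff := findFrom_first t op p i (le_of_lt hpi) hi hm hno
  rw [aLoop, dif_pos (by omega : p < t.length)]
  rw [dif_neg (by rw [hff]; omega), dif_neg (by rw [hff]; exact_mod_cast by omega)]
  rw [hff]
  rw [PySem.Chars.slice_eq_listSlice, PySem.List.slice_natCast, pyReverse_eq]
  simp

lemma bGo_eq_aLoop (t op cl : List Char) : ∀ (d i p : Nat) (out : List (List Char)) (buf : List Char),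
    t.length - i ≤ d → p ≤ i → i ≤ t.length →
    buf = (t.drop p).take (i - p) →
    (∀ q, p ≤ q → q < i → ¬ op <+: t.drop q) →
    bGo t op cl out buf i = PySem.Chars.join [] out ++ PySem.Chars.join [] (aLoop t op cl p) := by
  intro d
  induction d with
  | zero =>
    intro i p out buf hd hp hi hbuf hno
    obtain rfl : i = t.length := by omega
    exact bGo_terminal t op cl p out buf hp hbuf hno
  | succ d ih =>
    intro i p out buf hd hp hi hbuf hno
    by_cases hlt : i < t.length
    · rw [bGo, dif_pos hlt]
      by_cases hsw : PySem.Chars.startswith (t.drop i) op = true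
      · rw [if_pos hsw]
        have hop : op <+: t.drop i := (PySem.Chars.startswith_iff _ _).mp hsw
        -- A's pieces from p: buf reversed, then whatever the tag branch at i produces
        have hA : (aLoop t op cl p).flatten = buf.reverse ++ (aLoop t op cl i).flatten := by
          by_cases hpi : p = i
          · subst hpi
            have : buf = [] := by simp [hbuf]
            simp [this]
          · rw [aLoop_text_skip t op cl p i (by omega) (le_of_lt hlt) hop hno]
            simp [hbuf]
        have hffi : PySem.Chars.findFrom t op (i : Int) = (i : Int) :=
          findFrom_first t op i i le_rfl (le_of_lt hlt) hop (by omega)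
        cases hscan : bScanOff cl (t.drop i) with
        | none =>
          dsimp only
          have hscn := scan_none cl (t.drop i) hscan
          have hte : PySem.Chars.findFrom t cl (i : Int) = -1 := by
            apply findFrom_none t cl i (le_of_lt hlt)
            intro q hq
            have h2 := hscn (q - i)
            rw [List.drop_drop] at h2
            have heq : i + (q - i) = q := by omega
            rwa [heq] at h2
          have hAi : (aLoop t op cl i).flatten = [] := by
            rw [aLoop, dif_pos hlt, dif_neg (by rw [hffi]; omega), dif_pos hffi]
            rw [dif_pos (by rw [hffi]; exact hte)]
            rw [hffi, PySem.Chars.slice_eq_listSlice, PySem.List.slice_natCast]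
            simp
          rw [join_nil_eq_flatten, join_nil_eq_flatten, join_nil_eq_flatten, hA, hAi]
          simp
        | some k =>
          dsimp only
          obtain ⟨hk1, hk2⟩ := scan_some cl (t.drop i) k hscan
          rw [List.drop_drop] at hk1
          have hik1 : i + k + 1 ≤ t.length := by
            by_cases hcl : cl = []
            · have hk0 : k = 0 := by
                by_contra hk0
                exact (hk2 0 (by omega)) (by simp [hcl])
              omega
            · have hne : t.drop (i + k) ≠ [] := by
                intro hnil
                rw [hnil] at hk1
                exact hcl (List.prefix_nil.mp hk1)
              have := List.drop_eq_nil_of_le (le_refl t.length)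
              by_contra hcon
              exact hne (List.drop_eq_nil_of_le (by omega))
          have hte : PySem.Chars.findFrom t cl (i : Int) = ((i + k : Nat) : Int) := by
            apply findFrom_first t cl i (i + k) (by omega) (by omega) hk1
            intro q hq1 hq2
            have h2 := hk2 (q - i) (by omega)
            rw [List.drop_drop] at h2
            have heq : i + (q - i) = q := by omega
            rwa [heq] at h2
          have hAi : aLoop t op cl i =
              PySem.Chars.slice t (some (i : Int)) (some (((i + k : Nat) : Int) + 1)) ::
                aLoop t op cl (i + k + 1) := by
            rw [aLoop, dif_pos hlt, dif_neg (by rw [hffi]; omega), dif_pos hffi]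
            rw [dif_neg (by rw [hffi, hte]; omega)]
            rw [hffi, hte]
            congr 1
          have hrec := ih (i + k + 1) (i + k + 1)
            ((out ++ [buf.reverse]) ++ [PySem.Chars.slice t (some (i : Int)) (some ((i : Int) + (k : Int) + 1))])
            [] (by omega) (by omega) hik1 (by simp) (by omega)
          rw [hrec]
          have hpiece : PySem.Chars.slice t (some (i : Int)) (some ((i : Int) + (k : Int) + 1)) =
              PySem.Chars.slice t (some (i : Int)) (some (((i + k : Nat) : Int) + 1)) := by
            congr 2
          rw [join_nil_eq_flatten, join_nil_eq_flatten, join_nil_eq_flatten, join_nil_eq_flatten]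
          rw [hA, hAi, hpiece]
          simp
      · rw [if_neg hsw]
        have hnop : ¬ op <+: t.drop i := fun h => hsw ((PySem.Chars.startswith_iff _ _).mpr h)
        apply ih (i + 1) p out _ (by omega) (by omega) (by omega)
        · rw [hbuf]
          have hlen : i - p < (t.drop p).length := by simp; omega
          have hsucc : i + 1 - p = (i - p) + 1 := by omega
          rw [hsucc, List.take_add_one]
          congr 1
          rw [List.getElem?_drop]
          have heq : p + (i - p) = i := by omega
          rw [heq, List.getElem?_eq_getElem hlt]
          simp [List.getD_eq_getElem?_getD, List.getElem?_eq_getElem hlt]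
        · intro q hq1 hq2
          by_cases hqi : q < i
          · exact hno q hq1 hqi
          · obtain rfl : q = i := by omega
            exact hnop
    · obtain rfl : i = t.length := by omega
      exact bGo_terminal t op cl p out buf hp hbuf hno

-- ===== VERDICT (by name: the statement is the Claim_ definition above) =====
theorem reverse_text_not_tags_spec : Claim_equal_reverse_text_not_tags := by
  intro text tag_open tag_close _
  show _ = _
  unfold reverse_text_not_tags reverse_text_not_tags_alt
  refine congrArg String.ofList ?_
  have h := bGo_eq_aLoop text.toList tag_open.toList tag_close.toList text.toList.length 0 0 [] []
    (by omega) (by omega) (by omega) (by simp) (by omega)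
  rw [h]
  simp [PySem.Chars.join_nil]
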